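-- pv_equiv track=rewrite | github.com/tlynch001/VideoCaptioning | capcut_phrase_highlight_stable.py | choose_wrap_index
-- ===== SOURCE A (Python) =====
-- from typing import List, Dict, Optional
--
-- def choose_wrap_index(words: List[str]) -> Optional[int]:
--     """
--     Choose a wrap index for 2-line layout that balances line lengths.
--     Returns an index i meaning: words[:i] on line1, words[i:] on line2.
--     Returns None if no wrap needed.
--     """
--     if len(words) < 4:
--         return None
--
--     # Only wrap if the phrase is "long enough"
--     total_len = len(" ".join(words))
--     if total_len <= 18:
--         return None
--
--     best_i = 1
--     best_score = 10**9
--     for i in range(1, len(words)):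
--         left = " ".join(words[:i])
--         right = " ".join(words[i:])
--         score = abs(len(left) - len(right))
--         if score < best_score:
--             best_score = score
--             best_i = i
--     return best_i
-- ===== SOURCE B (Python) =====
-- from typing import List, Optional
--
-- def choose_wrap_index(words: List[str]) -> Optional[int]:
--     """
--     Choose a wrap index for 2-line layout that balances line lengths.
--     Single pass with a running prefix length instead of re-joining both
--     halves at every candidate index (O(n) instead of O(n^2)).
--     """
--     if len(words) < 4:
--         return None
--
--     # total length of " ".join(words): word lengths plus the n-1 spaces
--     total = sum(len(w) for w in words) + len(words) - 1
--     if total <= 18: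
--         return None
--
--     best_i, best_score = 1, 10**9
--     run = 0
--     for i, w in enumerate(words[:-1], start=1):
--         run += len(w)
--         left = run + i - 1            # len(" ".join(words[:i]))
--         right = total - left - 1      # the rest minus the joining space
--         score = abs(left - right)
--         if score < best_score:
--             best_i, best_score = i, score
--     return best_i
-- ===== Notes on version B (the rewrite author's own statement) =====
-- stated objective: faster
-- what changed: Replaces the per-index re-joining of both halves (each costing O(n)) with one pass that keeps a running prefix length and derives each line length arithmetically from the precomputed total.
import Mathlib
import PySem

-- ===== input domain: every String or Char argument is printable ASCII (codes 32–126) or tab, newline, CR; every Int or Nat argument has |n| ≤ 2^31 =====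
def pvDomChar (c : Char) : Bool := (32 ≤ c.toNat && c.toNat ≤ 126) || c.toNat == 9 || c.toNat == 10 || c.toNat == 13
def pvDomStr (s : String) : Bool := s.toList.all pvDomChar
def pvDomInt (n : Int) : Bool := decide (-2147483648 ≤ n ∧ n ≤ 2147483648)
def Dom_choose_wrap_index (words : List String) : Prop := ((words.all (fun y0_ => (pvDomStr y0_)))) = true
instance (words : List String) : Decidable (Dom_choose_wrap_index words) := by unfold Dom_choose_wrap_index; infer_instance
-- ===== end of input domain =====

-- B replaces A's per-index re-joining of both halves with one pass over a running
-- prefix length; the return values are proved identical on all inputs.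

-- ===== PORT A =====
-- A's loop body: join both halves at index i and score their length difference
def stepA (words : List String) (st : Int × Int) (i : Int) : Int × Int :=
  let left := PySem.Str.len (PySem.Str.join " " (PySem.List.slice words none (some i)))
  let right := PySem.Str.len (PySem.Str.join " " (PySem.List.slice words (some i) none))
  let score := |left - right|
  if score < st.2 then (i, score) else st

def choose_wrap_index (words : List String) : Option Int :=
  if (words.length : Int) < 4 then none
  else
    let total_len := PySem.Str.len (PySem.Str.join " " words)
    if total_len ≤ 18 then none
    else
      let r := (PySem.List.pyRange 1 (words.length : Int) 1).foldl (stepA words) (1, 10 ^ 9)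
      some r.1

-- ===== PORT B =====
-- B's loop body: state (run, best_i, best_score); line lengths derived from run and total
def stepB (total : Int) (st : Int × Int × Int) (iw : Int × String) : Int × Int × Int :=
  let run := st.1 + PySem.Str.len iw.2
  let left := run + iw.1 - 1
  let right := total - left - 1
  let score := |left - right|
  if score < st.2.2 then (run, iw.1, score) else (run, st.2.1, st.2.2)

def choose_wrap_index_alt (words : List String) : Option Int :=
  if (words.length : Int) < 4 then none
  else
    let total := (words.map PySem.Str.len).sum + (words.length : Int) - 1
    if total ≤ 18 then none
    else
      let st := (PySem.List.enumerate words.dropLast 1).foldl (stepB total) (0, 1, 10 ^ 9)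
      some st.2.1

-- ===== PRECONDITION & SPEC =====
def Spec_choose_wrap_index (words : List String) (out : Option Int) : Prop := out = choose_wrap_index_alt words
instance (words : List String) (out : Option Int) : Decidable (Spec_choose_wrap_index words out) := by unfold Spec_choose_wrap_index; infer_instance

-- ===== CLAIM (what is proved, stated in full; the proofs are below) =====
def Claim_equal_choose_wrap_index : Prop := ∀ (words : List String), Dom_choose_wrap_index words → Spec_choose_wrap_index words (choose_wrap_index words)

-- ===== LEMMAS AND PROOFS =====

-- length of sep.join(ps) for a one-char separator, on the Chars side
lemma join_length_chars (c : Char) (ps : List (List Char)) (h : ps ≠ []) :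
    ((PySem.Chars.join [c] ps).length : Int)
      = (ps.map (fun p => (p.length : Int))).sum + ps.length - 1 := by
  induction ps with
  | nil => cases h rfl
  | cons p rest ih =>
    cases rest with
    | nil => simp [PySem.Chars.join_singleton]
    | cons q rs =>
      rw [PySem.Chars.join_cons_cons]
      have h2 := ih (by simp)
      simp only [List.length_append, List.map_cons, List.sum_cons, List.length_cons,
        List.length_nil] at h2 ⊢
      push_cast at h2 ⊢
      omega

-- length of " ".join(ws) as a sum of word lengths
lemma join_len (ws : List String) (h : ws ≠ []) :
    PySem.Str.len (PySem.Str.join " " ws) = (ws.map PySem.Str.len).sum + (ws.length : Int) - 1 := by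
  have h2 : ws.map String.toList ≠ [] := by simpa using h
  have hj := join_length_chars ' ' (ws.map String.toList) h2
  have hsep : (" " : String).toList = [' '] := rfl
  rw [PySem.Str.len_eq, PySem.Str.toList_join, hsep, hj, List.map_map, List.length_map]
  congr 2

-- sum of word lengths of a (j+1)-prefix
lemma prefix_sum_succ (words : List String) (j : Nat) (hj : j < words.length) :
    ((words.take (j + 1)).map PySem.Str.len).sum
      = ((words.take j).map PySem.Str.len).sum + PySem.Str.len words[j] := by
  rw [List.take_add_one, List.getElem?_eq_getElem hj, List.map_append, List.sum_append]
  simp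

-- one step of B's loop equals one step of A's loop, with B's run tracking the prefix sum
lemma step_eq (words : List String) (total : Int)
    (htot : total = (words.map PySem.Str.len).sum + (words.length : Int) - 1)
    (j : Nat) (hj : 1 ≤ j) (hjn : j < words.length) (b s : Int) :
    stepB total (((words.take (j - 1)).map PySem.Str.len).sum, b, s) ((j : Int), words[j - 1])
      = (((words.take j).map PySem.Str.len).sum, stepA words (b, s) (j : Int)) := by
  have hrun : ((words.take (j - 1)).map PySem.Str.len).sum + PySem.Str.len words[j - 1]
      = ((words.take j).map PySem.Str.len).sum := by
    have h := prefix_sum_succ words (j - 1) (by omega)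
    have hjj : j - 1 + 1 = j := by omega
    rw [hjj] at h
    linarith
  have htake : words.take j ≠ [] := by
    apply List.ne_nil_of_length_pos
    rw [List.length_take]
    omega
  have hdrop : words.drop j ≠ [] := by
    apply List.ne_nil_of_length_pos
    rw [List.length_drop]
    omega
  have hleftA : PySem.Str.len (PySem.Str.join " " (PySem.List.slice words none (some (j : Int))))
      = ((words.take j).map PySem.Str.len).sum + (j : Int) - 1 := by
    rw [PySem.List.slice_to_natCast, join_len _ htake]
    congr 2
    simp [List.length_take]
    omega
  have hrightA : PySem.Str.len (PySem.Str.join " " (PySem.List.slice words (some (j : Int)) none))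
      = ((words.drop j).map PySem.Str.len).sum + ((words.length : Int) - j) - 1 := by
    rw [PySem.List.slice_from_natCast, join_len _ hdrop]
    congr 2
    push_cast [List.length_drop]
    omega
  have hsum : (words.map PySem.Str.len).sum
      = ((words.take j).map PySem.Str.len).sum + ((words.drop j).map PySem.Str.len).sum := by
    conv_lhs => rw [← List.take_append_drop j words]
    simp
  simp only [stepA, stepB, hleftA, hrightA, hrun]
  have hright : total - (((words.take j).map PySem.Str.len).sum + (j : Int) - 1) - 1
      = ((words.drop j).map PySem.Str.len).sum + ((words.length : Int) - j) - 1 := by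
    linarith
  rw [hright]
  split_ifs <;> rfl

-- the two loops agree (components 2,3 of B's state track A's state)
lemma loop_eq (words : List String) (total : Int)
    (htot : total = (words.map PySem.Str.len).sum + (words.length : Int) - 1) :
    ∀ (k j : Nat), 1 ≤ j → j + k = words.length → ∀ (b s : Int),
      ((PySem.List.enumerate (words.dropLast.drop (j - 1)) (j : Int)).foldl (stepB total)
        (((words.take (j - 1)).map PySem.Str.len).sum, b, s)).2
      = (PySem.List.pyRange (j : Int) (words.length : Int) 1).foldl (stepA words) (b, s) := by
  intro k
  induction k with
  | zero =>
    intro j hj hjk b s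
    have hdrop : words.dropLast.drop (j - 1) = [] := by
      apply List.drop_eq_nil_of_le
      simp [List.length_dropLast]
      omega
    have hnil : PySem.List.pyRange (j : Int) (words.length : Int) 1 = [] :=
      PySem.List.pyRange_one_eq_nil (by omega)
    rw [hdrop, hnil, PySem.List.enumerate_nil]
    rfl
  | succ k ih =>
    intro j hj hjk b s
    have hjn : j < words.length := by omega
    have hdl_len : j - 1 < words.dropLast.length := by
      simp [List.length_dropLast]
      omega
    have hdrop : words.dropLast.drop (j - 1) = words[j - 1] :: words.dropLast.drop j := by
      rw [List.drop_eq_getElem_cons hdl_len, List.getElem_dropLast]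
      have hjj : j - 1 + 1 = j := by omega
      rw [hjj]
    have hcons : PySem.List.pyRange (j : Int) (words.length : Int) 1
        = (j : Int) :: PySem.List.pyRange ((j : Int) + 1) (words.length : Int) 1 :=
      PySem.List.pyRange_one_cons (by exact_mod_cast hjn)
    rw [hdrop, PySem.List.enumerate_cons, hcons]
    simp only [List.foldl_cons]
    rw [step_eq words total htot j hj hjn b s]
    have h2 := ih (j + 1) (by omega) (by omega)
      (stepA words (b, s) (j : Int)).1 (stepA words (b, s) (j : Int)).2
    have hjj : j + 1 - 1 = j := by omega
    rw [hjj] at h2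
    push_cast at h2 ⊢
    rw [Prod.mk.eta] at h2
    exact h2

-- ===== VERDICT (by name: the statement is the Claim_ definition above) =====
theorem choose_wrap_index_spec : Claim_equal_choose_wrap_index := by
  intro words _
  unfold Spec_choose_wrap_index choose_wrap_index choose_wrap_index_alt
  by_cases h4 : (words.length : Int) < 4
  · simp [h4]
  · have hw : words ≠ [] := by
      intro h
      subst h
      simp at h4
    have hjoin : PySem.Str.len (PySem.Str.join " " words)
        = (words.map PySem.Str.len).sum + (words.length : Int) - 1 := join_len words hw
    simp only [h4, if_false, hjoin]
    by_cases h18 : (words.map PySem.Str.len).sum + (words.length : Int) - 1 ≤ 18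
    · simp [h18]
    · simp only [h18, if_false]
      have h := loop_eq words _ rfl (words.length - 1) 1 (le_refl 1) (by omega) 1 (10 ^ 9)
      simp only [Nat.cast_one, List.take_zero, List.map_nil, List.sum_nil, Nat.sub_self,
        List.drop_zero] at h
      rw [h]
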